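-- pv_equiv track=rewrite | github.com/triplebob/emis-xml-toolkit | utils/xml_parsers/value_set_parser.py | _group_by_exact_codes
-- ===== SOURCE A (Python) =====
-- from typing import Dict, List, Any, Optional, Set, Tuple
--
-- def _group_by_exact_codes(value_sets: List[Dict]) -> Dict[str, List[Dict]]:
--     """Group value sets that have identical code lists"""
--     code_groups = {}
--
--     for value_set in value_sets:
--         # Generate code signature
--         codes = []
--         for value_item in value_set.get('values', []):
--             if value_item and 'value' in value_item:
--                 codes.append(value_item['value'])
--
--         code_signature = '|'.join(sorted(codes))
--
--         if code_signature not in code_groups: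
--             code_groups[code_signature] = []
--         code_groups[code_signature].append(value_set)
--
--     return code_groups
-- ===== SOURCE B (Python) =====
-- def _group_by_exact_codes(value_sets):
--     """Group value sets that have identical code lists.
--
--     Alternative decomposition: tag every value set with its code signature in one
--     pass, then gather the groups per distinct signature (first-appearance order)
--     instead of aggregating incrementally into a dict.
--     """
--     def _signature(value_set):
--         codes = [v['value'] for v in value_set.get('values', []) if v and 'value' in v]
--         return '|'.join(sorted(codes))
--
--     tagged = [(_signature(vs), vs) for vs in value_sets]
--     order = []
--     for sig, _ in tagged:
--         if sig not in order:
--             order.append(sig)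
--     return {sig: [vs for s, vs in tagged if s == sig] for sig in order}
-- ===== Notes on version B (the rewrite author's own statement) =====
-- stated objective: alternative
-- what changed: A aggregates incrementally into a dict in a single pass; B first tags each value set with its signature, collects the distinct signatures in first-appearance order, and then builds each group by a per-signature gather over the tagged list.
import Mathlib
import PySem

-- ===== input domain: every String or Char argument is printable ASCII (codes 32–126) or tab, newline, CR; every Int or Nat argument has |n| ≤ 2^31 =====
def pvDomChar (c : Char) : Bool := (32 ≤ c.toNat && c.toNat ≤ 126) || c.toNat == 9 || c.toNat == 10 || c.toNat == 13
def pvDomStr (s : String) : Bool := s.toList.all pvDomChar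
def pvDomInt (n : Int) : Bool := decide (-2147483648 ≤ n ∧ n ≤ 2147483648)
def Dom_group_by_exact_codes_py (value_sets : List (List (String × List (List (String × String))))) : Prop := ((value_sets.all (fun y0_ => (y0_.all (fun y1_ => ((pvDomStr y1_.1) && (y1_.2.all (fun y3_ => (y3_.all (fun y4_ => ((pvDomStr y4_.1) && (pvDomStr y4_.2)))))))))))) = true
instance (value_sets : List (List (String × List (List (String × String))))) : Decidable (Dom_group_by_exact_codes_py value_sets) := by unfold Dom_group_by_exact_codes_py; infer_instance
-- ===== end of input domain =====

-- B groups by tagging each value set with its signature once, collecting distinct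
-- signatures in first-appearance order, then gathering each group by a per-signature
-- scan — instead of A's incremental dict aggregation (objective: alternative).

-- ===== PORT A =====
-- shared code-signature computation: codes collected from value_set.get('values', []),
-- skipping falsy items and items without a 'value' key, then '|'.join(sorted(codes))
def pvSig (value_set : List (String × List (List (String × String)))) : String :=
  let codes := ((PySem.Dict.mk value_set).getD "values" []).foldl
    (fun cs item =>
      if !item.isEmpty && (PySem.Dict.mk item).contains "value" then
        cs ++ [((PySem.Dict.mk item).get? "value").getD ""]   -- getD "" unreachable: guarded by contains
      else cs) []
  PySem.Str.join "|" (PySem.List.sorted codes (fun x => x) false)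

def group_by_exact_codes_py (value_sets : List (List (String × List (List (String × String))))) : List (String × List (List (String × List (List (String × String))))) :=
  (value_sets.foldl
    (fun code_groups value_set =>
      let code_signature := pvSig value_set
      let code_groups :=
        if code_groups.contains code_signature then code_groups
        else code_groups.insert code_signature []
      code_groups.modify code_signature [] (fun g => g ++ [value_set]))
    PySem.Dict.empty).items

-- ===== PORT B =====
def group_by_exact_codes_py_alt (value_sets : List (List (String × List (List (String × String))))) : List (String × List (List (String × List (List (String × String))))) :=
  let tagged := value_sets.map (fun vs => (pvSig vs, vs))
  let order := tagged.foldl (fun o p => PySem.Set.add o p.1) []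
  order.map (fun sig => (sig, (tagged.filter (fun p => p.1 == sig)).map (fun p => p.2)))

-- ===== PRECONDITION & SPEC =====
def Spec_group_by_exact_codes_py (value_sets : List (List (String × List (List (String × String))))) (out : List (String × List (List (String × List (List (String × String)))))) : Prop := out = group_by_exact_codes_py_alt value_sets
instance (value_sets : List (List (String × List (List (String × String))))) (out : List (String × List (List (String × List (List (String × String)))))) : Decidable (Spec_group_by_exact_codes_py value_sets out) := by
  unfold Spec_group_by_exact_codes_py
  letI i1 : DecidableEq (List (String × List (List (String × String)))) := inferInstance
  letI i2 : DecidableEq (List (List (String × List (List (String × String))))) := inferInstance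
  letI i3 : DecidableEq (String × List (List (String × List (List (String × String))))) := inferInstance
  letI i4 : DecidableEq (List (String × List (List (String × List (List (String × String)))))) := inferInstance
  exact i4 out (group_by_exact_codes_py_alt value_sets)

-- ===== CLAIM (what is proved, stated in full; the proofs are below) =====
def Claim_equal_group_by_exact_codes_py : Prop := ∀ (value_sets : List (List (String × List (List (String × String))))), Dom_group_by_exact_codes_py value_sets → Spec_group_by_exact_codes_py value_sets (group_by_exact_codes_py value_sets)

-- ===== LEMMAS AND PROOFS =====

-- A's "if absent, initialise to []; then append" step is one Dict.modify
theorem pv_stepA_eq_modify {ν : Type} (d : PySem.Dict String (List ν)) (k : String) (v : ν) :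
    (if d.contains k then d else d.insert k []).modify k [] (fun g => g ++ [v])
      = d.modify k [] (fun g => g ++ [v]) := by
  by_cases h : d.contains k
  · simp [h]
  · simp only [h, Bool.false_eq_true, if_false, PySem.Dict.modify]
    have h' : d.contains k = false := by simpa using h
    rw [PySem.Dict.getD_insert_self, PySem.Dict.insert_insert_self,
        PySem.Dict.getD_of_not_contains d [] h']

theorem group_by_exact_codes_py_spec : Claim_equal_group_by_exact_codes_py := by
  unfold Claim_equal_group_by_exact_codes_py
  intro value_sets _
  unfold Spec_group_by_exact_codes_py group_by_exact_codes_py group_by_exact_codes_py_alt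
  -- name the tagged list and rewrite A's fold over value_sets as a fold over it
  set tagged := value_sets.map (fun vs => (pvSig vs, vs)) with htagged
  have hA : (value_sets.foldl
      (fun code_groups value_set =>
        (if code_groups.contains (pvSig value_set) then code_groups
         else code_groups.insert (pvSig value_set) []).modify (pvSig value_set) []
          (fun g => g ++ [value_set]))
      PySem.Dict.empty)
      = tagged.foldl (fun d p => d.modify p.1 [] (fun g => g ++ [p.2])) PySem.Dict.empty := by
    rw [htagged, List.foldl_map]
    exact PySem.List.foldl_congr_mem value_sets _ _ _
      (fun d vs _ => pv_stepA_eq_modify d (pvSig vs) vs)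
  rw [hA]
  set D := tagged.foldl (fun d p => d.modify p.1 [] (fun g => g ++ [p.2])) PySem.Dict.empty with hD
  have hnd : D.keys.Nodup := by
    rw [hD]
    exact PySem.Dict.nodup_keys_foldl_modify_key tagged Prod.fst []
      (fun d p => (fun g => g ++ [p.2])) PySem.Dict.empty PySem.Dict.nodup_keys_empty
  have hkeys : D.keys = tagged.foldl (fun o p => PySem.Set.add o p.1) [] := by
    rw [hD, PySem.Dict.keys_foldl_modify_key]
    show PySem.Set.update PySem.Dict.empty.keys (tagged.map Prod.fst) = _
    rw [PySem.Set.update, List.foldl_map]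
    rfl
  rw [PySem.Dict.items_eq_map_keys D hnd [], hkeys]
  refine List.map_congr_left (fun k _ => ?_)
  have hget : D.getD k [] = (tagged.filter (fun p => p.1 == k)).map (fun p => p.2) := by
    rw [hD, PySem.Dict.getD_foldl_modify_append]
    simp [PySem.Dict.getD_empty]
  rw [hget]

-- ===== VERDICT (by name: the statement is the Claim_ definition above) =====
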